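-- pv_equiv track=rewrite | github.com/colemai/bioinformatics_scripts | practice_exam/practice_exam_script.py | n50_and_n50_index
-- ===== SOURCE A (Python) =====
-- def n50_and_n50_index (assembly_dict, assembly_size):
--     """
--     Input: Dict of assembly {Label: Sequence} each as str, Assembly size as int
--     Output: tuple (n50 size, n50 index)
--     """
--     #make list of tuples [(contig_label, length_contig)]
--     contigs_length_tuples = []
--     for key, value in assembly_dict.items():
--         contigs_length_tuples.append((key, len(value)))
--     #arrange list by size of value
--     contigs_by_size = sorted(contigs_length_tuples, key=lambda k: k[1])
--
--     #Go through list sorted by length, add longest together and add them to contigs_in_50 list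
--     cumulative_size = 0
--     contigs_in_50 = []
--     for label,length in contigs_by_size[::-1]:
--         if cumulative_size < assembly_size:
--             cumulative_size += length
--             contigs_in_50.append(length)
--         else:
--             continue
--     #Return the last item added to contigs_in_50 (i.e the smallest length contained) and length
--     return(contigs_in_50[-1], len(contigs_in_50))
-- ===== SOURCE B (Python) =====
-- def n50_and_n50_index(assembly_dict, assembly_size):
--     # descending lengths, cumulative sums, binary search for the first
--     # cumulative sum >= assembly_size (capped at the last index)
--     lengths = sorted((len(v) for v in assembly_dict.values()), reverse=True)
--     cums = []
--     total = 0
--     for length in lengths: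
--         total += length
--         cums.append(total)
--     lo, hi = 0, len(lengths) - 1
--     while lo < hi:
--         mid = (lo + hi) // 2
--         if cums[mid] < assembly_size:
--             lo = mid + 1
--         else:
--             hi = mid
--     return (lengths[lo], lo + 1)
-- ===== Notes on version B (the rewrite author's own statement) =====
-- stated objective: alternative
-- what changed: B sorts the contig lengths descending once, builds the cumulative-sum array, and finds the N50 position by binary search on it, instead of A's ascending sort of (label,length) tuples followed by a reversed full scan with a stateful accumulate-or-skip loop.
import Mathlib
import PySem

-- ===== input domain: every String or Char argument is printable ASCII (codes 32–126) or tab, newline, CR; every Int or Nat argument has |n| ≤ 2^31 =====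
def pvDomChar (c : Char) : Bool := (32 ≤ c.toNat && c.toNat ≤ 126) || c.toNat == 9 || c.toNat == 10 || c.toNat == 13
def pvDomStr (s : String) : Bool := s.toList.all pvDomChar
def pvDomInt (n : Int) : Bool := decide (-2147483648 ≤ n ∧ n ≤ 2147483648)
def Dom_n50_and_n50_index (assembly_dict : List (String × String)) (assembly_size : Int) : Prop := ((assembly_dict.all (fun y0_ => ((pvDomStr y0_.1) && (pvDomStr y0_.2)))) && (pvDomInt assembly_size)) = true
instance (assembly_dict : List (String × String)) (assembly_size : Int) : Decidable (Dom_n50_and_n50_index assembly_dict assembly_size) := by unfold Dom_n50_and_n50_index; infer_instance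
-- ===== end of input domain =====

-- B replaces A's ascending tuple sort + reversed accumulate-or-skip scan by a descending
-- length sort, a cumulative-sum array and a binary search for the N50 position (objective: alternative).


-- ===== PORT A =====
def n50_and_n50_index (assembly_dict : List (String × String)) (assembly_size : Int) : Int × Int :=
  let d := PySem.Dict.ofList assembly_dict
  -- for key, value in assembly_dict.items(): contigs_length_tuples.append((key, len(value)))
  let contigs_length_tuples : List (String × Int) :=
    d.items.foldl (fun acc kv => acc ++ [(kv.1, PySem.Str.len kv.2)]) []
  let contigs_by_size := PySem.List.sorted contigs_length_tuples (fun k => k.2)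
  -- for label, length in contigs_by_size[::-1]: …
  let st : Int × List Int :=
    ((PySem.List.slice? contigs_by_size none none (-1)).getD []).foldl
      (fun st lt => if st.1 < assembly_size then (st.1 + lt.2, st.2 ++ [lt.2]) else st)
      (0, [])
  -- contigs_in_50[-1]; in range whenever Pre_ holds
  (PySem.List.pyGetD st.2 (-1) 0, (st.2.length : Int))

-- ===== PORT B =====
-- the while-loop binary search of Source B: first index in [lo, hi] whose cums entry is ≥ assembly_size
def pvBsearch (cums : List Int) (assembly_size : Int) (lo hi : Int) : Int :=
  if h : lo < hi then
    let mid := PySem.Int.floordiv (lo + hi) 2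
    -- cums[mid]; mid is in range whenever 0 ≤ lo ∧ hi < len cums
    if PySem.List.pyGetD cums mid 0 < assembly_size then
      pvBsearch cums assembly_size (mid + 1) hi
    else
      pvBsearch cums assembly_size lo mid
  else lo
termination_by (hi - lo).toNat
decreasing_by
  · have hb := PySem.Int.floordiv_two_mid_bounds (le_of_lt h)
    omega
  · have hb := PySem.Int.floordiv_two_mid_bounds (le_of_lt h)
    have hlt : PySem.Int.floordiv (lo + hi) 2 < hi :=
      (PySem.Int.floordiv_lt_iff_lt_mul (by omega)).mpr (by omega)
    omega

def n50_and_n50_index_alt (assembly_dict : List (String × String)) (assembly_size : Int) : Int × Int :=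
  let d := PySem.Dict.ofList assembly_dict
  let lengths := PySem.List.sorted (d.values.map (fun v => PySem.Str.len v)) (fun x => x) true
  -- for length in lengths: total += length; cums.append(total)
  let tc : Int × List Int :=
    lengths.foldl (fun st length => (st.1 + length, st.2 ++ [st.1 + length])) (0, [])
  let lo := pvBsearch tc.2 assembly_size 0 ((lengths.length : Int) - 1)
  -- lengths[lo]; in range whenever Pre_ holds
  (PySem.List.pyGetD lengths lo 0, lo + 1)

-- ===== PRECONDITION & SPEC =====
-- Pre_ excludes exactly the inputs where A raises IndexError: the empty dict and
-- non-positive assembly_size, on which A's selection loop picks nothing and contigs_in_50[-1] fails.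
def Pre_n50_and_n50_index (assembly_dict : List (String × String)) (assembly_size : Int) : Prop :=
  assembly_dict ≠ [] ∧ 1 ≤ assembly_size
instance (assembly_dict : List (String × String)) (assembly_size : Int) : Decidable (Pre_n50_and_n50_index assembly_dict assembly_size) := by unfold Pre_n50_and_n50_index; infer_instance

def pvWitness_n50_and_n50_index : (List (String × String)) × Int := ([("a", "xx"), ("b", "y")], 2)

def Spec_n50_and_n50_index (assembly_dict : List (String × String)) (assembly_size : Int) (out : Int × Int) : Prop := out = n50_and_n50_index_alt assembly_dict assembly_size
instance (assembly_dict : List (String × String)) (assembly_size : Int) (out : Int × Int) : Decidable (Spec_n50_and_n50_index assembly_dict assembly_size out) := by unfold Spec_n50_and_n50_index; infer_instance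

-- ===== CLAIM (what is proved, stated in full; the proofs are below) =====
def Claim_equal_n50_and_n50_index : Prop := ∀ (assembly_dict : List (String × String)) (assembly_size : Int), Dom_n50_and_n50_index assembly_dict assembly_size → Pre_n50_and_n50_index assembly_dict assembly_size → Spec_n50_and_n50_index assembly_dict assembly_size (n50_and_n50_index assembly_dict assembly_size)

-- ===== LEMMAS AND PROOFS =====

-- number of contigs A's loop selects, starting from running total `cum`
def pvSelCount (size : Int) : List Int → Int → Nat
  | [], _ => 0
  | x :: xs, cum => if cum < size then pvSelCount size xs (cum + x) + 1 else 0

theorem pvFold_stuck (size cum : Int) (acc : List Int) (L : List Int) (h : ¬ cum < size) :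
    L.foldl (fun st lt => if st.1 < size then (st.1 + lt, st.2 ++ [lt]) else st) (cum, acc)
      = (cum, acc) := by
  induction L with
  | nil => rfl
  | cons x xs ih => simpa [List.foldl_cons, if_neg h] using ih

theorem pvFold_sel (size : Int) (L : List Int) : ∀ (cum : Int) (acc : List Int),
    (L.foldl (fun st lt => if st.1 < size then (st.1 + lt, st.2 ++ [lt]) else st) (cum, acc)).2
      = acc ++ L.take (pvSelCount size L cum) := by
  induction L with
  | nil => intro cum acc; simp
  | cons x xs ih =>
      intro cum acc
      by_cases h : cum < size
      · simp only [List.foldl_cons, if_pos h, pvSelCount, ih (cum + x) (acc ++ [x])]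
        simp [List.take_succ_cons]
      · rw [List.foldl_cons]
        simp only [if_neg h]
        rw [pvFold_stuck size cum acc xs h]
        simp [pvSelCount, if_neg h]

theorem pvSelCount_le (size : Int) (L : List Int) : ∀ cum, pvSelCount size L cum ≤ L.length := by
  induction L with
  | nil => intro cum; simp [pvSelCount]
  | cons x xs ih =>
      intro cum
      by_cases h : cum < size
      · simp only [pvSelCount, if_pos h, List.length_cons]
        exact Nat.succ_le_succ (ih (cum + x))
      · simp [pvSelCount, if_neg h]

theorem pvSelCount_pos (size : Int) (L : List Int) (cum : Int) (hL : L ≠ []) (h : cum < size) :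
    1 ≤ pvSelCount size L cum := by
  cases L with
  | nil => exact absurd rfl hL
  | cons x xs => simp [pvSelCount, if_pos h]

-- (b): every exclusive prefix sum inside the selection is < size
theorem pvSelCount_lt (size : Int) (L : List Int) : ∀ (cum : Int) (i : Nat),
    i < pvSelCount size L cum → cum + (L.take i).sum < size := by
  induction L with
  | nil => intro cum i hi; simp [pvSelCount] at hi
  | cons x xs ih =>
      intro cum i hi
      by_cases h : cum < size
      · cases i with
        | zero => simpa using h
        | succ j =>
            simp only [pvSelCount, if_pos h] at hi
            have := ih (cum + x) j (by omega)
            simp only [List.take_succ_cons, List.sum_cons]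
            omega
      · simp [pvSelCount, if_neg h] at hi
  -- (c): if the loop stops before exhausting L, the stopping prefix sum is ≥ size

theorem pvSelCount_stop (size : Int) (L : List Int) : ∀ (cum : Int),
    pvSelCount size L cum < L.length →
      size ≤ cum + (L.take (pvSelCount size L cum)).sum := by
  induction L with
  | nil => intro cum h; simp at h
  | cons x xs ih =>
      intro cum h
      by_cases hc : cum < size
      · simp only [pvSelCount, if_pos hc] at h ⊢
        have := ih (cum + x) (by simpa using Nat.lt_of_succ_lt_succ (by simpa using h))
        simp only [List.take_succ_cons, List.sum_cons]
        omega
      · simp [pvSelCount, if_neg hc]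
        omega

-- the cums-building fold of B
theorem pvFold_cums (L : List Int) : ∀ (tot : Int) (acc : List Int),
    (L.foldl (fun st length => (st.1 + length, st.2 ++ [st.1 + length])) (tot, acc)).2
      = acc ++ (List.range L.length).map (fun j => tot + (L.take (j + 1)).sum) := by
  induction L with
  | nil => intro tot acc; simp
  | cons x xs ih =>
      intro tot acc
      simp only [List.foldl_cons, ih (tot + x) (acc ++ [tot + x]), List.length_cons,
        List.range_succ_eq_map, List.map_cons, List.map_map]
      simp [List.append_assoc, Function.comp, List.take_succ_cons, add_assoc]

-- binary search finds t-1, the index of the last selected contig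
theorem pvTake_sum_mono (L : List Int) (hnn : ∀ x ∈ L, 0 ≤ x) (p q : Nat) (hpq : p ≤ q) :
    (L.take p).sum ≤ (L.take q).sum := by
  rw [show q = p + (q - p) by omega, List.take_add, List.sum_append]
  have h0 : 0 ≤ (((L.drop p).take (q - p)).sum) :=
    List.sum_nonneg (fun x hx =>
      hnn x ((List.drop_sublist p L).subset ((List.take_sublist _ _).subset hx)))
  omega

-- binary search finds t-1, the index of the last selected contig
theorem pvBsearch_correct (size : Int) (L : List Int)
    (hnn : ∀ x ∈ L, 0 ≤ x) (t : Nat) (ht1 : 1 ≤ t) (htn : t ≤ L.length)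
    (hb : ∀ i : Nat, i < t → (L.take i).sum < size)
    (hc : t < L.length → size ≤ (L.take t).sum)
    (cums : List Int) (hcums : cums = (List.range L.length).map (fun j => (L.take (j + 1)).sum)) :
    ∀ (lo hi : Int), 0 ≤ lo → lo ≤ (t : Int) - 1 → ((t : Int) - 1) ≤ hi → hi ≤ (L.length : Int) - 1 →
      pvBsearch cums size lo hi = (t : Int) - 1 := by
  intro lo hi
  induction hm : (hi - lo).toNat using Nat.strong_induction_on generalizing lo hi with
  | _ m ih =>
  intro h0 hlo hhi hhin
  rw [pvBsearch]
  by_cases h : lo < hi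
  · rw [dif_pos h]
    have hmid := PySem.Int.floordiv_two_mid_bounds (le_of_lt h)
    have hmidlt : PySem.Int.floordiv (lo + hi) 2 < hi :=
      (PySem.Int.floordiv_lt_iff_lt_mul (by omega)).mpr (by omega)
    set mid := PySem.Int.floordiv (lo + hi) 2 with hmiddef
    have hmr : PySem.List.pyGetD cums mid 0 = (L.take (mid.toNat + 1)).sum := by
      rw [PySem.List.pyGetD_eq_getElem cums 0 (by omega)
        (by rw [hcums]; simp; omega)]
      subst hcums
      rw [List.getElem_map, List.getElem_range]
    by_cases hv : PySem.List.pyGetD cums mid 0 < size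
    · rw [if_pos hv]
      have hkey : mid + 1 ≤ (t : Int) - 1 := by
        by_contra hcon
        by_cases hteq : t = L.length
        · omega
        · have hlt2 := hc (by omega)
          have hmo : (L.take t).sum ≤ (L.take (mid.toNat + 1)).sum :=
            pvTake_sum_mono L hnn t (mid.toNat + 1) (by omega)
          rw [hmr] at hv
          omega
      exact ih ((hi - (mid + 1)).toNat) (by omega) (mid + 1) hi rfl (by omega) hkey hhi hhin
    · rw [if_neg hv]
      have hkey : (t : Int) - 1 ≤ mid := by
        by_contra hcon
        have h2 : (mid.toNat + 1) < t := by omega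
        have := hb (mid.toNat + 1) h2
        rw [hmr] at hv
        omega
      exact ih ((mid - lo).toNat) (by omega) lo mid rfl h0 hlo hkey (by omega)
  · rw [dif_neg h]
    omega

theorem n50_lengths_eq (tuples : List (String × Int)) :
    ((PySem.List.sorted tuples (fun k => k.2)).reverse.map (fun p => p.2))
      = PySem.List.sorted (tuples.map (fun p => p.2)) (fun x => x) true := by
  have h1 : ((PySem.List.sorted tuples (fun k => k.2)).reverse.map (fun p => p.2)).Perm
      (tuples.map (fun p => p.2)) :=
    ((List.reverse_perm _).trans (PySem.List.sorted_perm _ _ _)).map _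
  have h2 : (PySem.List.sorted (tuples.map (fun p => p.2)) (fun x => x) true).Perm
      (tuples.map (fun p => p.2)) := PySem.List.sorted_perm _ _ _
  apply List.eq_of_perm_of_sorted (le := fun a b : Int => b ≤ a)
  · intro a b _ _ hab hba; omega
  · rw [List.pairwise_map, List.pairwise_reverse]
    exact PySem.List.sorted_pairwise _ _
  · exact PySem.List.sorted_pairwise_rev _ _
  · exact h1.trans h2.symm

-- items of a dict stay non-empty under inserts
theorem pvFoldInsert_ne_nil (l : List (String × String)) :
    ∀ d : PySem.Dict String String, d.items ≠ [] →
      (l.foldl (fun acc p => acc.insert p.1 p.2) d).items ≠ [] := by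
  induction l with
  | nil => intro d hd; simpa using hd
  | cons x xs ih =>
      intro d hd
      rw [List.foldl_cons]
      apply ih
      rw [PySem.Dict.items_insert]
      by_cases hck : d.contains x.1 = true
      · rw [if_pos hck]; simpa using hd
      · rw [if_neg hck]; simp

theorem pvOfList_ne_nil (l : List (String × String)) (hl : l ≠ []) :
    (PySem.Dict.ofList l).items ≠ [] := by
  cases l with
  | nil => exact absurd rfl hl
  | cons x xs =>
      show ((PySem.Dict.empty.update (x :: xs)).items ≠ [])
      rw [PySem.Dict.update]
      rw [List.foldl_cons]
      apply pvFoldInsert_ne_nil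
      rw [PySem.Dict.items_insert]
      simp [PySem.Dict.contains_empty]

-- ===== VERDICT (by name: the statement is the Claim_ definition above) =====
theorem n50_and_n50_index_spec : Claim_equal_n50_and_n50_index := by
  intro ad size _ hpre
  obtain ⟨hne, hsz⟩ := hpre
  unfold Spec_n50_and_n50_index n50_and_n50_index n50_and_n50_index_alt
  simp only []
  set d := PySem.Dict.ofList ad with hd
  -- A's tuple list is a map
  have htup : d.items.foldl (fun acc kv => acc ++ [(kv.1, PySem.Str.len kv.2)]) []
      = d.items.map (fun kv => (kv.1, PySem.Str.len kv.2)) := by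
    rw [PySem.List.foldl_append_singleton_eq_map]; simp
  set tuples := d.items.map (fun kv => (kv.1, PySem.Str.len kv.2)) with htuples
  -- the common descending length list
  have hmapsnd : tuples.map (fun p => p.2) = d.values.map (fun v => PySem.Str.len v) := by
    rw [htuples, List.map_map, PySem.Dict.values, List.map_map]
    rfl
  set L := PySem.List.sorted (d.values.map (fun v => PySem.Str.len v)) (fun x => x) true with hL
  have hrev : ((PySem.List.sorted tuples (fun k => k.2)).reverse.map (fun p => p.2)) = L := by
    rw [n50_lengths_eq, hmapsnd]
  -- facts about L
  have hLne : L ≠ [] := by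
    rw [hL, Ne, PySem.List.sorted_eq_nil_iff, List.map_eq_nil_iff, PySem.Dict.values,
      List.map_eq_nil_iff]
    exact pvOfList_ne_nil ad hne
  have hnn : ∀ x ∈ L, 0 ≤ x := by
    intro x hx
    rw [hL, PySem.List.mem_sorted, List.mem_map] at hx
    obtain ⟨v, _, hv⟩ := hx
    rw [← hv, PySem.Str.len_eq]
    positivity
  set t := pvSelCount size L 0 with ht
  have ht1 : 1 ≤ t := pvSelCount_pos size L 0 hLne (by omega)
  have htn : t ≤ L.length := pvSelCount_le size L 0
  have hb : ∀ i : Nat, i < t → (L.take i).sum < size := by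
    intro i hi
    rw [ht] at hi
    have := pvSelCount_lt size L 0 i hi
    omega
  have hc : t < L.length → size ≤ (L.take t).sum := by
    intro hlt
    rw [ht] at hlt ⊢
    have := pvSelCount_stop size L 0 hlt
    omega
  -- A's loop
  rw [htup, PySem.List.slice?_none_none_neg_one]
  simp only [Option.getD_some]
  have hfoldA : ((PySem.List.sorted tuples (fun k => k.2)).reverse.foldl
      (fun st lt => if st.1 < size then (st.1 + lt.2, st.2 ++ [lt.2]) else st) ((0 : Int), ([] : List Int))).2
      = L.take t := by
    have hmapfold : ((PySem.List.sorted tuples (fun k => k.2)).reverse.map (fun p => p.2)).foldl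
        (fun st x => if st.1 < size then (st.1 + x, st.2 ++ [x]) else st) ((0 : Int), ([] : List Int))
        = (PySem.List.sorted tuples (fun k => k.2)).reverse.foldl
        (fun st lt => if st.1 < size then (st.1 + lt.2, st.2 ++ [lt.2]) else st) ((0 : Int), ([] : List Int)) :=
      List.foldl_map
    rw [← hmapfold, hrev, pvFold_sel size L 0 [], List.nil_append, ← ht]
  -- B's cums
  have hfoldB : (L.foldl (fun st length => (st.1 + length, st.2 ++ [st.1 + length])) ((0 : Int), ([] : List Int))).2
      = (List.range L.length).map (fun j => (L.take (j + 1)).sum) := by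
    rw [pvFold_cums L 0 []]
    simp
  rw [hfoldA, hfoldB]
  -- B's binary search
  have hlen : (PySem.List.sorted (d.values.map (fun v => PySem.Str.len v)) (fun x => x) true).length = L.length := by
    rw [hL]
  have hbs : pvBsearch ((List.range L.length).map (fun j => (L.take (j + 1)).sum)) size 0 ((L.length : Int) - 1)
      = (t : Int) - 1 :=
    pvBsearch_correct size L hnn t ht1 htn hb hc _ rfl 0 ((L.length : Int) - 1)
      (le_refl 0) (by omega) (by omega) (by omega)
  rw [hbs]
  -- both components
  have htake_len : (L.take t).length = t := by
    rw [List.length_take]; omega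
  have htake_ne : L.take t ≠ [] := by
    intro hcon
    have := congrArg List.length hcon
    rw [htake_len] at this
    simp at this
    omega
  rw [Prod.mk.injEq]
  refine ⟨?_, ?_⟩
  · rw [PySem.List.pyGetD_neg_one _ _ htake_ne, List.getLast_eq_getElem,
      PySem.List.pyGetD_eq_getElem _ _ (by omega) (by omega)]
    rw [List.getElem_take]
    congr 1
    rw [htake_len]
    omega
  · rw [htake_len]
    omega
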